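-- pv_equiv track=rewrite | github.com/fatima178/FYP-AllocAIte | backend/processing/recommendation_log_processing.py | _serialise_outcome_tags
-- ===== SOURCE A (Python) =====
-- from typing import Iterable, Optional
--
-- class RecommendationLogError(Exception):
--     def __init__(self, status_code: int, message: str):
--         super().__init__(message)
--         self.status_code = status_code
--         self.message = message
--
-- ALLOWED_OUTCOME_TAGS = {
--     "Delivered on time",
--     "High quality",
--     "Needed support",
--     "Exceeded expectations",
--     "Communication issues",
--     "Scope changed",
-- }
--
-- def _serialise_outcome_tags(outcome_tags: Optional[Iterable[str]]) -> Optional[str]: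
--     if outcome_tags is None:
--         return None
--     clean = []
--     seen = set()
--     for item in outcome_tags:
--         label = str(item or "").strip()
--         if not label:
--             continue
--         if label not in ALLOWED_OUTCOME_TAGS:
--             raise RecommendationLogError(400, "invalid outcome tag")
--         if label in seen:
--             continue
--         seen.add(label)
--         clean.append(label)
--     return " | ".join(clean) if clean else None
-- ===== SOURCE B (Python) =====
-- from typing import Iterable, Optional
--
-- class RecommendationLogError(Exception):
--     def __init__(self, status_code: int, message: str):
--         super().__init__(message)
--         self.status_code = status_code
--         self.message = message
--
-- ALLOWED_OUTCOME_TAGS = {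
--     "Delivered on time",
--     "High quality",
--     "Needed support",
--     "Exceeded expectations",
--     "Communication issues",
--     "Scope changed",
-- }
--
-- def _serialise_outcome_tags(outcome_tags):
--     if outcome_tags is None:
--         return None
--     labels = [l for item in outcome_tags if (l := str(item or "").strip())]
--     for l in labels:
--         if l not in ALLOWED_OUTCOME_TAGS:
--             raise RecommendationLogError(400, "invalid outcome tag")
--     clean = list(dict.fromkeys(labels))
--     return " | ".join(clean) if clean else None
-- ===== Notes on version B (the rewrite author's own statement) =====
-- stated objective: idiomatic
-- what changed: Replaces A's single stateful loop (seen-set + append accumulator + per-item validation) with a pipeline: one comprehension collecting cleaned non-empty labels, a separate validation pass, and dict.fromkeys for order-preserving dedup.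
import Mathlib
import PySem

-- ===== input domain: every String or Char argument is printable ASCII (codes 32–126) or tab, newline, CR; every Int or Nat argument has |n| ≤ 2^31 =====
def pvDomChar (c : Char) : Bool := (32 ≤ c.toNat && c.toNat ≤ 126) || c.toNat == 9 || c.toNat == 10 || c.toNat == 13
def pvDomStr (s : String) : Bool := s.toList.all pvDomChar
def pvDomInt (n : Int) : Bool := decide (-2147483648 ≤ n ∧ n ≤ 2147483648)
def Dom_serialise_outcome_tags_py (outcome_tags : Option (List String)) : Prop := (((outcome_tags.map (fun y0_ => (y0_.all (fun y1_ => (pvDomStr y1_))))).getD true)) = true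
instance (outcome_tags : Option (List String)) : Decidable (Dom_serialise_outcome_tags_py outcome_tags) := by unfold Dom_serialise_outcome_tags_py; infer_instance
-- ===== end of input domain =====

-- B restructures A's single stateful loop into a pipeline (collect labels, validate, dedup via
-- dict.fromkeys, join); same cost, more idiomatic. Pre_ excludes inputs on which A raises.

-- ALLOWED_OUTCOME_TAGS, used only for membership tests
def pvAllowed : List String :=
  ["Delivered on time", "High quality", "Needed support",
   "Exceeded expectations", "Communication issues", "Scope changed"]

-- ===== PORT A =====
-- the for-loop of A: state (seen, clean); 'none' marks the raise (excluded by Pre_)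
def pvALoop : List String → PySem.Set String → List String → Option (List String)
  | [], _, clean => some clean
  | item :: rest, seen, clean =>
    let label := PySem.Str.strip (if item = "" then "" else item)  -- str(item or "").strip()
    if label = "" then pvALoop rest seen clean
    else if ¬ pvAllowed.contains label then none                   -- raise RecommendationLogError
    else if PySem.Set.contains seen label then pvALoop rest seen clean
    else pvALoop rest (PySem.Set.add seen label) (clean ++ [label])

def serialise_outcome_tags_py (outcome_tags : Option (List String)) : Option String :=
  match outcome_tags with
  | none => none
  | some xs =>
    match pvALoop xs PySem.Set.empty [] with
    | none => none  -- raise path, outside Pre_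
    | some clean => if clean ≠ [] then some (PySem.Str.join " | " clean) else none

-- ===== PORT B =====
def serialise_outcome_tags_py_alt (outcome_tags : Option (List String)) : Option String :=
  match outcome_tags with
  | none => none
  | some xs =>
    let labels := (xs.map (fun item => PySem.Str.strip (if item = "" then "" else item))).filter
      (fun l => l ≠ "")
    if labels.any (fun l => ¬ pvAllowed.contains l) then none  -- raise path, outside Pre_
    else
      let clean := PySem.List.dedup labels                     -- list(dict.fromkeys(labels))
      if clean ≠ [] then some (PySem.Str.join " | " clean) else none

-- ===== PRECONDITION & SPEC =====
-- Pre_ excludes exactly the inputs containing a non-empty stripped label outside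
-- ALLOWED_OUTCOME_TAGS: there A (and B) raise RecommendationLogError.
def Pre_serialise_outcome_tags_py (outcome_tags : Option (List String)) : Prop :=
  ((outcome_tags.getD []).all
    (fun s => PySem.Str.strip s = "" || pvAllowed.contains (PySem.Str.strip s))) = true
instance (outcome_tags : Option (List String)) : Decidable (Pre_serialise_outcome_tags_py outcome_tags) := by unfold Pre_serialise_outcome_tags_py; infer_instance

def pvWitness_serialise_outcome_tags_py : Option (List String) :=
  some ["  High quality ", "High quality", "", "Scope changed"]

def Spec_serialise_outcome_tags_py (outcome_tags : Option (List String)) (out : Option String) : Prop := out = serialise_outcome_tags_py_alt outcome_tags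
instance (outcome_tags : Option (List String)) (out : Option String) : Decidable (Spec_serialise_outcome_tags_py outcome_tags out) := by unfold Spec_serialise_outcome_tags_py; infer_instance

-- ===== CLAIM (what is proved, stated in full; the proofs are below) =====
def Claim_equal_serialise_outcome_tags_py : Prop := ∀ (outcome_tags : Option (List String)), Dom_serialise_outcome_tags_py outcome_tags → Pre_serialise_outcome_tags_py outcome_tags → Spec_serialise_outcome_tags_py outcome_tags (serialise_outcome_tags_py outcome_tags)

-- ===== LEMMAS AND PROOFS =====

-- A's loop, when every label is empty or allowed, computes exactly the Set.add fold of the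
-- cleaned non-empty labels starting from the accumulator (seen and clean coincide then).
theorem pvALoop_eq (xs : List String) (acc : PySem.Set String)
    (h : ∀ s ∈ xs, PySem.Str.strip s = "" ∨ pvAllowed.contains (PySem.Str.strip s) = true) :
    pvALoop xs acc acc =
      some (((xs.map (fun item => PySem.Str.strip (if item = "" then "" else item))).filter
        (fun l => l ≠ "")).foldl PySem.Set.add acc) := by
  induction xs generalizing acc with
  | nil => rfl
  | cons item rest ih =>
    have hstrip : PySem.Str.strip (if item = "" then "" else item) = PySem.Str.strip item := by
      by_cases hi : item = "" <;> simp [hi]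
    have hrest : ∀ s ∈ rest, PySem.Str.strip s = "" ∨ pvAllowed.contains (PySem.Str.strip s) = true :=
      fun s hs => h s (List.mem_cons_of_mem _ hs)
    simp only [pvALoop, hstrip, List.map_cons, List.filter_cons]
    by_cases he : PySem.Str.strip item = ""
    · rw [if_pos he, if_neg (by simp [he])]
      exact ih acc hrest
    · have hall : pvAllowed.contains (PySem.Str.strip item) = true := by
        rcases h item (List.mem_cons_self ..) with h' | h'
        · exact absurd h' he
        · exact h'
      rw [if_neg he, if_neg (not_not_intro hall)]
      by_cases hmem : PySem.Str.strip item ∈ acc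
      · rw [if_pos (show PySem.Set.contains acc (PySem.Str.strip item) = true by
            simp [PySem.Set.contains_eq_listContains]; exact hmem),
          if_pos (by simp [he]), List.foldl_cons, PySem.Set.add_of_mem hmem]
        exact ih acc hrest
      · rw [if_neg (show ¬ PySem.Set.contains acc (PySem.Str.strip item) = true by
            simp [PySem.Set.contains_eq_listContains]; exact hmem),
          if_pos (by simp [he]), List.foldl_cons, PySem.Set.add_of_not_mem hmem]
        exact ih (acc ++ [PySem.Str.strip item]) hrest

-- ===== VERDICT (by name: the statement is the Claim_ definition above) =====
theorem serialise_outcome_tags_py_spec : Claim_equal_serialise_outcome_tags_py := by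
  intro ot _ hpre
  unfold Spec_serialise_outcome_tags_py
  cases ot with
  | none => rfl
  | some xs =>
    unfold Pre_serialise_outcome_tags_py at hpre
    simp only [Option.getD_some, List.all_eq_true, Bool.or_eq_true, decide_eq_true_eq] at hpre
    have h : ∀ s ∈ xs, PySem.Str.strip s = "" ∨ pvAllowed.contains (PySem.Str.strip s) = true := by
      intro s hs; rcases hpre s hs with h' | h' <;> [exact Or.inl h'; exact Or.inr h']
    have hnoinv : ((xs.map (fun item => PySem.Str.strip (if item = "" then "" else item))).filter
        (fun l => l ≠ "")).any (fun l => ¬ pvAllowed.contains l) = false := by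
      simp only [List.any_eq_false, List.mem_filter, List.mem_map, decide_eq_true_eq, not_not]
      rintro l ⟨⟨s, hs, rfl⟩, hne⟩
      have hstrip : PySem.Str.strip (if s = "" then "" else s) = PySem.Str.strip s := by
        by_cases hi : s = "" <;> simp [hi]
      rw [hstrip] at hne ⊢
      rcases h s hs with h' | h'
      · exact absurd (by simp [h']) hne
      · simpa using h'
    have hloop := pvALoop_eq xs PySem.Set.empty h
    simp only [serialise_outcome_tags_py, serialise_outcome_tags_py_alt]
    rw [show pvALoop xs PySem.Set.empty [] = pvALoop xs PySem.Set.empty PySem.Set.empty from rfl,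
      hloop, hnoinv]
    simp only [Bool.false_eq_true, if_false]
    rw [PySem.List.dedup_eq_ofList, PySem.Set.ofList_eq_foldl]
    rfl
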